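-- pv_equiv track=rewrite | github.com/urno38/cocoAI | user_template/main_concat_attio_corporation.py | remplacer_caracteres
-- ===== SOURCE A (Python) =====
-- def remplacer_caracteres(chaine):
--     nouvelle_chaine = []
--     for i in range(len(chaine)):
--         if chaine[i] == ",":
--             # Vérifie si la virgule est placée avant le point
--             if "." in chaine[i:]:
--                 nouvelle_chaine.append(" ")
--             else:
--                 nouvelle_chaine.append("")
--         elif chaine[i] == ".":
--             # Vérifie si le point est placé avant la virgule
--             if "," in chaine[i:]:
--                 nouvelle_chaine.append(" ")
--             else:
--                 nouvelle_chaine.append("")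
--         else:
--             nouvelle_chaine.append(chaine[i])
--     return "".join(nouvelle_chaine)
-- ===== SOURCE B (Python) =====
-- def remplacer_caracteres(chaine):
--     # One pass from the right, tracking whether a '.' or ',' occurs later.
--     out = []
--     seen_dot = False
--     seen_comma = False
--     for c in reversed(chaine):
--         if c == ",":
--             if seen_dot:
--                 out.append(" ")
--             seen_comma = True
--         elif c == ".":
--             if seen_comma:
--                 out.append(" ")
--             seen_dot = True
--         else:
--             out.append(c)
--     return "".join(reversed(out))
-- ===== Notes on version B (the rewrite author's own statement) =====
-- stated objective: alternative
-- what changed: A rescans the whole remaining suffix for a dot or comma at every index; B makes a single right-to-left pass carrying two booleans (a dot/comma occurs later), so the inner suffix scans disappear.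
import Mathlib
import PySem

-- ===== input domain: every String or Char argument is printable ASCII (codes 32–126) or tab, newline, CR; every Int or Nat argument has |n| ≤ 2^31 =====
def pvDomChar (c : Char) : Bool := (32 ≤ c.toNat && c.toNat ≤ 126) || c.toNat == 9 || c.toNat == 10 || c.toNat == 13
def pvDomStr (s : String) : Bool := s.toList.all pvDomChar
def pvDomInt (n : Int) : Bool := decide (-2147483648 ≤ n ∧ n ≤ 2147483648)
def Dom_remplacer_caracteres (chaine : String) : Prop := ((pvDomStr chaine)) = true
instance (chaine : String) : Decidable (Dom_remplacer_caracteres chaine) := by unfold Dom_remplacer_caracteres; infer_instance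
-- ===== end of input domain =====

-- B replaces A's per-index suffix rescans by one right-to-left pass with two seen-flags
-- (alternative decomposition; same return value, no side effects).
-- ===== PORT A =====
-- A: per index i, tests '.'/',' membership in the whole suffix chaine[i:]; recursion on
-- suffixes (head = chaine[i], whole suffix = chaine[i:]) transcribes the loop exactly.
def pvAGo : List Char → List Char
  | [] => []
  | c :: rest =>
    (if c = ',' then (if (c :: rest).contains '.' then [' '] else [])
     else if c = '.' then (if (c :: rest).contains ',' then [' '] else [])
     else [c]) ++ pvAGo rest

def remplacer_caracteres (chaine : String) : String :=
  String.ofList (pvAGo chaine.toList)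

-- ===== PORT B =====
-- B: single pass over the reversed string carrying seen_dot/seen_comma flags.
def pvBGo : List Char → Bool → Bool → List Char
  | [], _, _ => []
  | c :: rest, seenDot, seenComma =>
    if c = ',' then
      (if seenDot then [' '] else []) ++ pvBGo rest seenDot true
    else if c = '.' then
      (if seenComma then [' '] else []) ++ pvBGo rest true seenComma
    else
      c :: pvBGo rest seenDot seenComma

def remplacer_caracteres_alt (chaine : String) : String :=
  String.ofList (pvBGo chaine.toList.reverse false false).reverse

-- ===== PRECONDITION & SPEC =====
def Spec_remplacer_caracteres (chaine : String) (out : String) : Prop := out = remplacer_caracteres_alt chaine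
instance (chaine : String) (out : String) : Decidable (Spec_remplacer_caracteres chaine out) := by unfold Spec_remplacer_caracteres; infer_instance

-- ===== CLAIM (what is proved, stated in full; the proofs are below) =====
def Claim_equal_remplacer_caracteres : Prop := ∀ (chaine : String), Dom_remplacer_caracteres chaine → Spec_remplacer_caracteres chaine (remplacer_caracteres chaine)

-- ===== LEMMAS AND PROOFS =====

-- What A contributes at one position, with flags meaning "a '.' (resp. ',') occurs
-- after the end of the current suffix".
def pvPiece (x : Char) (rest : List Char) (sd sc : Bool) : List Char :=
  if x = ',' then (if rest.contains '.' || sd then [' '] else [])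
  else if x = '.' then (if rest.contains ',' || sc then [' '] else [])
  else [x]

-- A's per-suffix recursion generalised with the two flags.
def pvG : List Char → Bool → Bool → List Char
  | [], _, _ => []
  | x :: rest, sd, sc => pvPiece x rest sd sc ++ pvG rest sd sc

theorem pvAGo_eq_pvG (cs : List Char) : pvAGo cs = pvG cs false false := by
  induction cs with
  | nil => rfl
  | cons c rest ih =>
    simp only [pvAGo, pvG, pvPiece, ih, Bool.or_false, List.contains_cons]
    by_cases hc : c = ','
    · subst hc; simp
    · by_cases hd : c = '.'
      · subst hd; simp
      · simp [hc, hd]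

theorem pvPiece_append (x c : Char) (rest : List Char) (sd sc : Bool) :
    pvPiece x (rest ++ [c]) sd sc = pvPiece x rest (sd || (c == '.')) (sc || (c == ',')) := by
  unfold pvPiece
  by_cases hd : c = '.'
  · subst hd; simp
  · by_cases hcm : c = ','
    · subst hcm; simp
    · have h3 : (c == '.') = false := by simp [hd]
      have h4 : (c == ',') = false := by simp [hcm]
      have h5 : ¬('.' = c) := fun h => hd h.symm
      have h6 : ¬(',' = c) := fun h => hcm h.symm
      simp [h3, h4, h5, h6]

theorem pvG_append_singleton (xs : List Char) (c : Char) (sd sc : Bool) :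
    pvG (xs ++ [c]) sd sc = pvG xs (sd || (c == '.')) (sc || (c == ',')) ++ pvG [c] sd sc := by
  induction xs with
  | nil => simp [pvG]
  | cons x rest ih =>
    simp only [List.cons_append, pvG, ih, pvPiece_append, List.append_assoc]

theorem pvBGo_reverse (rs : List Char) (sd sc : Bool) :
    (pvBGo rs sd sc).reverse = pvG rs.reverse sd sc := by
  induction rs generalizing sd sc with
  | nil => rfl
  | cons c rest ih =>
    simp only [pvBGo, List.reverse_cons, pvG_append_singleton]
    by_cases hc : c = ','
    · subst hc
      rw [if_pos rfl, List.reverse_append, ih]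
      cases sd <;> simp [pvG, pvPiece]
    · by_cases hd : c = '.'
      · subst hd
        rw [if_neg (by decide : ¬('.' = ',')), if_pos rfl, List.reverse_append, ih]
        cases sc <;> simp [pvG, pvPiece]
      · rw [if_neg hc, if_neg hd, List.reverse_cons, ih]
        have h3 : (c == '.') = false := by simp [hd]
        have h4 : (c == ',') = false := by simp [hc]
        simp [pvG, pvPiece, h3, h4, hc, hd]

-- ===== VERDICT (by name: the statement is the Claim_ definition above) =====
theorem remplacer_caracteres_spec : Claim_equal_remplacer_caracteres := by
  intro chaine _
  unfold Spec_remplacer_caracteres remplacer_caracteres remplacer_caracteres_alt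
  rw [pvBGo_reverse, List.reverse_reverse, pvAGo_eq_pvG]
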